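-- pv_equiv track=rewrite | github.com/jgvhabets/updrsTapping | utils/utils_dataManagement.py | get_arr_key_indices
-- ===== SOURCE A (Python) =====
-- def get_arr_key_indices(ch_names, hand_code):
--
--     dict_out = {}
--
--     if hand_code == 'bilat':
--
--         aux_keys = [
--             'L_X', 'L_Y', 'L_Z',
--             'R_X', 'R_Y', 'R_Z'
--         ]
--
--     else:
--
--         if 'L' in hand_code: side = 'L'
--         elif 'R' in hand_code: side = 'R'
--
--         aux_keys = [
--             f'{side}_X', f'{side}_Y', f'{side}_Z'
--         ]
--
--     aux_count = 0
--
--     for i, key in enumerate(ch_names):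
--
--         if key in ['X', 'Y', 'Z']:
--
--             if f'L_{key}' in dict_out.keys():
--
--                 dict_out[f'R_{key}'] = i
--
--             else:
--
--                 dict_out[f'L_{key}'] = i
--
--         elif 'aux' in key.lower():
--
--             dict_out[aux_keys[aux_count]] = i
--             aux_count += 1
--
--
--
--
--
--
--
--     return dict_out
-- ===== SOURCE B (Python) =====
-- def get_arr_key_indices(ch_names, hand_code):
--     # Two-phase, stateless decomposition: build an assignment-event stream where each
--     # decision is recomputed from the prefix, then fold the events into the dict.
--     if hand_code == 'bilat':
--         aux_keys = ['L_X', 'L_Y', 'L_Z', 'R_X', 'R_Y', 'R_Z']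
--     else:
--         side = 'L' if 'L' in hand_code else 'R'
--         aux_keys = [side + '_X', side + '_Y', side + '_Z']
--
--     events = []
--     for i, key in enumerate(ch_names):
--         if key in ('X', 'Y', 'Z'):
--             tag = 'R_' if any(k == 'L_' + key for k, _ in events) else 'L_'
--             events.append((tag + key, i))
--         elif 'aux' in key.lower():
--             n = sum('aux' in c.lower() for c in ch_names[:i])
--             events.append((aux_keys[n], i))
--
--     dict_out = {}
--     for k, i in events:
--         dict_out[k] = i
--     return dict_out
-- ===== Notes on version B (the rewrite author's own statement) =====
-- stated objective: alternative
-- what changed: Replaces A's single stateful dict-and-counter loop by a two-phase event-stream build: each L/R decision is made by scanning the events so far and each aux slot index is recomputed from the channel-name prefix, and the dict is assembled in one final fold over the events.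
import Mathlib
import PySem

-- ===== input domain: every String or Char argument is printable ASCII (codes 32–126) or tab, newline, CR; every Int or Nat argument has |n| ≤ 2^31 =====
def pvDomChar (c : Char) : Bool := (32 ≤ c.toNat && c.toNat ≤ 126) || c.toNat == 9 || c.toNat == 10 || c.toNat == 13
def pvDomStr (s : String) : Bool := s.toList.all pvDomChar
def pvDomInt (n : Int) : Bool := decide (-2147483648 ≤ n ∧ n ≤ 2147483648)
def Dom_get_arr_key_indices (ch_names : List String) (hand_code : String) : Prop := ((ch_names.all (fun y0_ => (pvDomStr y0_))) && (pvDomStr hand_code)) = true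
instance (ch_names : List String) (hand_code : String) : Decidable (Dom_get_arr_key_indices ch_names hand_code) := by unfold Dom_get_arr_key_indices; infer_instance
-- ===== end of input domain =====

-- B replaces A's stateful dict-and-counter loop by a stateless event stream (decisions
-- recomputed from the prefix) folded into the dict at the end; objective: alternative.

-- ===== PORT A =====
-- A's main loop: state is (dict_out, aux_count); aux_keys[aux_count] out of range is an
-- IndexError in Python, excluded by Pre_ (the .getD "" totalization is never reached there).
def pvStepA (aux_keys : List String) (st : PySem.Dict String Int × Int) (p : Int × String) : PySem.Dict String Int × Int :=
  if p.2 == "X" || p.2 == "Y" || p.2 == "Z" then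
    if st.1.contains ("L_" ++ p.2) then (st.1.insert ("R_" ++ p.2) p.1, st.2)
    else (st.1.insert ("L_" ++ p.2) p.1, st.2)
  else if PySem.Str.isIn "aux" (PySem.Str.lower p.2) then
    (st.1.insert ((PySem.List.pyGet? aux_keys st.2).getD "") p.1, st.2 + 1)
  else st

def pvLoopA (aux_keys : List String) (items : List (Int × String)) (st : PySem.Dict String Int × Int) : PySem.Dict String Int × Int :=
  items.foldl (pvStepA aux_keys) st

def get_arr_key_indices (ch_names : List String) (hand_code : String) : List (String × Int) :=
  let aux_keys : List String :=
    if hand_code == "bilat" then ["L_X", "L_Y", "L_Z", "R_X", "R_Y", "R_Z"]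
    else
      -- Python raises NameError when hand_code has neither 'L' nor 'R'; excluded by Pre_,
      -- the final "L" is an arbitrary totalization of that undefined variable.
      let side : String :=
        if PySem.Str.isIn "L" hand_code then "L"
        else if PySem.Str.isIn "R" hand_code then "R" else "L"
      [side ++ "_X", side ++ "_Y", side ++ "_Z"]
  (pvLoopA aux_keys (PySem.List.enumerate ch_names) (PySem.Dict.empty, 0)).1.items

-- ===== PORT B =====
-- B phase 1: the event stream; each event's key is computed from the events so far /
-- the ch_names prefix (ch_names[:i]); aux_keys[n] out of range = IndexError, excluded by Pre_.
def pvStepB (full aux_keys : List String) (evs : List (String × Int)) (p : Int × String) : List (String × Int) :=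
  if p.2 == "X" || p.2 == "Y" || p.2 == "Z" then
    let tag : String := if evs.any (fun e => e.1 == "L_" ++ p.2) then "R_" else "L_"
    evs ++ [(tag ++ p.2, p.1)]
  else if PySem.Str.isIn "aux" (PySem.Str.lower p.2) then
    let n : Int := ((PySem.List.slice full none (some p.1)).countP
      (fun c => PySem.Str.isIn "aux" (PySem.Str.lower c)) : Int)
    evs ++ [((PySem.List.pyGet? aux_keys n).getD "", p.1)]
  else evs

def pvLoopB (full aux_keys : List String) (items : List (Int × String)) (evs : List (String × Int)) : List (String × Int) :=
  items.foldl (pvStepB full aux_keys) evs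

-- B phase 2: fold the events into the dict
def pvDictOf (evs : List (String × Int)) : PySem.Dict String Int :=
  evs.foldl (fun d e => d.insert e.1 e.2) PySem.Dict.empty

def get_arr_key_indices_alt (ch_names : List String) (hand_code : String) : List (String × Int) :=
  let aux_keys : List String :=
    if hand_code == "bilat" then ["L_X", "L_Y", "L_Z", "R_X", "R_Y", "R_Z"]
    else
      let side : String := if PySem.Str.isIn "L" hand_code then "L" else "R"
      [side ++ "_X", side ++ "_Y", side ++ "_Z"]
  (pvDictOf (pvLoopB ch_names aux_keys (PySem.List.enumerate ch_names) [])).items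

-- ===== PRECONDITION & SPEC =====
-- Pre_ excludes exactly the inputs where Python A raises: NameError (hand_code ≠ 'bilat'
-- containing neither 'L' nor 'R') and IndexError (more 'aux' channels than aux slots).
def Pre_get_arr_key_indices (ch_names : List String) (hand_code : String) : Prop :=
  (hand_code = "bilat" ∨ PySem.Str.isIn "L" hand_code = true ∨ PySem.Str.isIn "R" hand_code = true) ∧
  ch_names.countP (fun c => PySem.Str.isIn "aux" (PySem.Str.lower c)) ≤
    (if hand_code = "bilat" then 6 else 3)
instance (ch_names : List String) (hand_code : String) : Decidable (Pre_get_arr_key_indices ch_names hand_code) := by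
  unfold Pre_get_arr_key_indices; infer_instance

def pvWitness_get_arr_key_indices : List String × String := (["X", "aux1", "Y", "X"], "bilat")

def Spec_get_arr_key_indices (ch_names : List String) (hand_code : String) (out : List (String × Int)) : Prop := out = get_arr_key_indices_alt ch_names hand_code
instance (ch_names : List String) (hand_code : String) (out : List (String × Int)) : Decidable (Spec_get_arr_key_indices ch_names hand_code out) := by unfold Spec_get_arr_key_indices; infer_instance

-- ===== CLAIM (what is proved, stated in full; the proofs are below) =====
def Claim_equal_get_arr_key_indices : Prop := ∀ (ch_names : List String) (hand_code : String), Dom_get_arr_key_indices ch_names hand_code → Pre_get_arr_key_indices ch_names hand_code → Spec_get_arr_key_indices ch_names hand_code (get_arr_key_indices ch_names hand_code)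

-- ===== LEMMAS AND PROOFS =====

theorem contains_foldl_insert (evs : List (String × Int)) (d : PySem.Dict String Int) (k : String) :
    (evs.foldl (fun d e => d.insert e.1 e.2) d).contains k
      = (evs.any (fun e => e.1 == k) || d.contains k) := by
  induction evs generalizing d with
  | nil => simp
  | cons e evs ih =>
      rw [List.foldl_cons, ih, PySem.Dict.contains_insert, List.any_cons]
      have hcomm : (k == e.1) = (e.1 == k) := by simp [eq_comm]
      rw [hcomm]
      simp [Bool.or_comm, Bool.or_assoc, Bool.or_left_comm]

theorem contains_pvDictOf (evs : List (String × Int)) (k : String) :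
    (pvDictOf evs).contains k = evs.any (fun e => e.1 == k) := by
  simp [pvDictOf, contains_foldl_insert]

theorem pvDictOf_append (evs : List (String × Int)) (k : String) (v : Int) :
    pvDictOf (evs ++ [(k, v)]) = (pvDictOf evs).insert k v := by
  simp [pvDictOf]

-- the invariant: A's running dict is the dict of B's event stream, A's counter the prefix aux count
theorem pvMain (aux_keys : List String) :
    ∀ (rest pre : List String) (evs : List (String × Int)),
      (pvLoopA aux_keys (PySem.List.enumerate rest (pre.length : Int))
          (pvDictOf evs, (pre.countP (fun c => PySem.Str.isIn "aux" (PySem.Str.lower c)) : Int))).1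
        = pvDictOf (pvLoopB (pre ++ rest) aux_keys
            (PySem.List.enumerate rest (pre.length : Int)) evs) := by
  intro rest
  induction rest with
  | nil => intro pre evs; simp [pvLoopA, pvLoopB]
  | cons key rest ih =>
      intro pre evs
      rw [PySem.List.enumerate_cons]
      rw [pvLoopA, pvLoopB, List.foldl_cons, List.foldl_cons]
      rw [← pvLoopA, ← pvLoopB]
      have hlen : (pre.length : Int) + 1 = ((pre ++ [key]).length : Int) := by
        simp
      have hfull : pre ++ key :: rest = (pre ++ [key]) ++ rest := by simp
      by_cases hax : (key == "X" || key == "Y" || key == "Z") = true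
      · have hkey : (key = "X" ∨ key = "Y") ∨ key = "Z" := by
          simpa [beq_iff_eq] using hax
        have hnaux : PySem.Chars.isIn ['a', 'u', 'x'] (PySem.Chars.lower key.toList) = false := by
          rcases hkey with (h | h) | h <;> subst h <;> decide
        have hcnt : pre.countP (fun c => PySem.Str.isIn "aux" (PySem.Str.lower c))
            = (pre ++ [key]).countP (fun c => PySem.Str.isIn "aux" (PySem.Str.lower c)) := by
          simp [List.countP_append, hnaux]
        rw [pvStepA, pvStepB]
        simp only [hax, if_true, contains_pvDictOf]
        by_cases hc : (evs.any (fun e => e.1 == "L_" ++ key)) = true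
        · simp only [hc, if_true]
          rw [← pvDictOf_append evs ("R_" ++ key) ((pre.length : Int)), hlen, hcnt, hfull]
          exact ih (pre ++ [key]) (evs ++ [("R_" ++ key, (pre.length : Int))])
        · simp only [Bool.not_eq_true] at hc
          simp only [hc]
          rw [← pvDictOf_append evs ("L_" ++ key) ((pre.length : Int)), hlen, hcnt, hfull]
          exact ih (pre ++ [key]) (evs ++ [("L_" ++ key, (pre.length : Int))])
      · rw [Bool.not_eq_true] at hax
        by_cases haux : PySem.Str.isIn "aux" (PySem.Str.lower key) = true
        · have haux' : PySem.Chars.isIn ['a', 'u', 'x'] (PySem.Chars.lower key.toList) = true := by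
            simpa using haux
          have hcnt : pre.countP (fun c => PySem.Str.isIn "aux" (PySem.Str.lower c)) + 1
              = (pre ++ [key]).countP (fun c => PySem.Str.isIn "aux" (PySem.Str.lower c)) := by
            simp [List.countP_append, haux']
          have hslice : (PySem.List.slice (pre ++ key :: rest) none (some (pre.length : Int))).countP
              (fun c => PySem.Str.isIn "aux" (PySem.Str.lower c))
              = pre.countP (fun c => PySem.Str.isIn "aux" (PySem.Str.lower c)) := by
            rw [PySem.List.slice_to_natCast]
            have : (pre ++ key :: rest).take pre.length = pre := by
              rw [List.take_append_of_le_length (le_refl _)]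
              simp
            rw [this]
          rw [pvStepA, pvStepB]
          simp only [hax, haux, hslice, Bool.false_eq_true, if_false, if_true]
          rw [← pvDictOf_append]
          have hcntInt : (pre.countP (fun c => PySem.Str.isIn "aux" (PySem.Str.lower c)) : Int) + 1
              = ((pre ++ [key]).countP (fun c => PySem.Str.isIn "aux" (PySem.Str.lower c)) : Int) := by
            rw [← hcnt]; push_cast; ring
          rw [hlen, hcntInt, hfull]
          exact ih (pre ++ [key]) _
        · rw [Bool.not_eq_true] at haux
          have haux' : PySem.Chars.isIn ['a', 'u', 'x'] (PySem.Chars.lower key.toList) = false := by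
            simpa using haux
          have hcnt : pre.countP (fun c => PySem.Str.isIn "aux" (PySem.Str.lower c))
              = (pre ++ [key]).countP (fun c => PySem.Str.isIn "aux" (PySem.Str.lower c)) := by
            simp [List.countP_append, haux']
          rw [pvStepA, pvStepB]
          simp only [hax, haux, Bool.false_eq_true, if_false]
          rw [hlen, hcnt, hfull]
          exact ih (pre ++ [key]) evs

-- ===== VERDICT (by name: the statement is the Claim_ definition above) =====
theorem get_arr_key_indices_spec : Claim_equal_get_arr_key_indices := by
  unfold Claim_equal_get_arr_key_indices
  intro ch_names hand_code _ hpre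
  unfold Spec_get_arr_key_indices get_arr_key_indices get_arr_key_indices_alt
  have hmain : ∀ ak : List String,
      (pvLoopA ak (PySem.List.enumerate ch_names) (PySem.Dict.empty, 0)).1.items
        = (pvDictOf (pvLoopB ch_names ak (PySem.List.enumerate ch_names) [])).items := by
    intro ak
    have h := pvMain ak ch_names [] []
    simp only [List.length_nil, Nat.cast_zero, List.countP_nil, List.nil_append] at h
    have hempty : pvDictOf [] = PySem.Dict.empty := rfl
    rw [hempty] at h
    exact congrArg PySem.Dict.items h
  by_cases hb : hand_code = "bilat"
  · simp only [hb, beq_self_eq_true, if_true]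
    exact hmain _
  · have hb' : (hand_code == "bilat") = false := by simp [hb]
    simp only [hb']
    rcases hpre.1 with h | hL | hR
    · exact absurd h hb
    · simp only [hL, if_true]
      exact hmain _
    · by_cases hL2 : PySem.Str.isIn "L" hand_code = true
      · simp only [hL2, if_true]; exact hmain _
      · simp only [Bool.not_eq_true] at hL2
        simp only [hL2, hR, if_true, if_false, Bool.false_eq_true]
        exact hmain _
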